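-- pv_equiv track=rewrite | github.com/ag-cs1/advent_of_code | day_3/solution.py | get_gamma_epsilon
-- ===== SOURCE A (Python) =====
-- def get_gamma_epsilon(occur):
--     gamma = ""
--     epsilon = ""
--     for o in occur:
--         if o[0] > o[1]:
--             gamma += "0"
--             epsilon += "1"
--         else:
--             gamma += "1"
--             epsilon += "0"
--
--     return gamma, epsilon
-- ===== SOURCE B (Python) =====
-- def get_gamma_epsilon(occur):
--     # Encode gamma as an integer bit accumulator; epsilon is its XOR complement.
--     n = len(occur)
--     g = 0
--     for o in occur:
--         g = 2 * g + (0 if o[0] > o[1] else 1)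
--     e = g ^ ((1 << n) - 1)
--     idxs = range(n - 1, -1, -1)
--     gamma = ''.join('1' if (g >> i) & 1 == 1 else '0' for i in idxs)
--     epsilon = ''.join('1' if (e >> i) & 1 == 1 else '0' for i in idxs)
--     return gamma, epsilon
-- ===== Notes on version B (the rewrite author's own statement) =====
-- stated objective: alternative
-- what changed: B encodes gamma as an integer bit accumulator (g = 2*g + bit), computes epsilon arithmetically as g XOR (2^n - 1), and only at the end renders both integers to bit strings by shifting/masking, instead of growing two strings character by character.
import Mathlib
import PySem

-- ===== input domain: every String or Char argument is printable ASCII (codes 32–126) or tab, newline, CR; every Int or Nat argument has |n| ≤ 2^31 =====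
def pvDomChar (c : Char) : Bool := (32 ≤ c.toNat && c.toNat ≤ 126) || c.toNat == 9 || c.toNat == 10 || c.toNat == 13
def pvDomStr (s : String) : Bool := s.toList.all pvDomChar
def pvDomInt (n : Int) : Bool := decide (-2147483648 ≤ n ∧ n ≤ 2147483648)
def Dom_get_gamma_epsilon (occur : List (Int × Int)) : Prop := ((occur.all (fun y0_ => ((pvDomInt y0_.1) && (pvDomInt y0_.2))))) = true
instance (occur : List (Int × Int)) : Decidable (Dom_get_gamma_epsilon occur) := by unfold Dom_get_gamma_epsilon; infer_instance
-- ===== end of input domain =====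

-- B computes gamma as an integer bit accumulator, epsilon as its XOR complement, and renders
-- the two integers to bit strings at the end (alternative algorithm; same O(n); equal output).

-- ===== PORT A =====
-- one loop growing gamma and epsilon strings in lockstep
def get_gamma_epsilon (occur : List (Int × Int)) : String × String :=
  occur.foldl
    (fun (st : String × String) o =>
      if o.1 > o.2 then (st.1 ++ "0", st.2 ++ "1") else (st.1 ++ "1", st.2 ++ "0"))
    ("", "")

-- ===== PORT B =====
def get_gamma_epsilon_alt (occur : List (Int × Int)) : String × String :=
  let n := occur.length
  let g := occur.foldl (fun g o => 2 * g + (if o.1 > o.2 then 0 else 1)) 0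
  let e := g ^^^ ((1 <<< n) - 1)
  let idxs := (List.range n).reverse          -- range(n-1, -1, -1)
  (String.ofList (idxs.map (fun i => if (g >>> i) &&& 1 == 1 then '1' else '0')),
   String.ofList (idxs.map (fun i => if (e >>> i) &&& 1 == 1 then '1' else '0')))

-- ===== PRECONDITION & SPEC =====
def Spec_get_gamma_epsilon (occur : List (Int × Int)) (out : String × String) : Prop := out = get_gamma_epsilon_alt occur
instance (occur : List (Int × Int)) (out : String × String) : Decidable (Spec_get_gamma_epsilon occur out) := by unfold Spec_get_gamma_epsilon; infer_instance

-- ===== CLAIM (what is proved, stated in full; the proofs are below) =====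
def Claim_equal_get_gamma_epsilon : Prop := ∀ (occur : List (Int × Int)), Dom_get_gamma_epsilon occur → Spec_get_gamma_epsilon occur (get_gamma_epsilon occur)

-- ===== LEMMAS AND PROOFS =====

theorem pv_zero : ("0" : String) = String.ofList ['0'] := rfl
theorem pv_one : ("1" : String) = String.ofList ['1'] := rfl

-- A's lockstep fold, started from any accumulators, appends the two mapped strings.
theorem pv_fold_eq (occur : List (Int × Int)) : ∀ (g e : List Char),
    occur.foldl
      (fun (st : String × String) o =>
        if o.1 > o.2 then (st.1 ++ "0", st.2 ++ "1") else (st.1 ++ "1", st.2 ++ "0"))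
      (String.ofList g, String.ofList e)
    = (String.ofList (g ++ occur.map (fun o => if o.1 > o.2 then '0' else '1')),
       String.ofList (e ++ occur.map (fun o => if o.1 > o.2 then '1' else '0'))) := by
  induction occur with
  | nil => intro g e; simp
  | cons o rest ih =>
    intro g e
    by_cases h : o.1 > o.2
    · have h2 := ih (g ++ ['0']) (e ++ ['1'])
      rw [String.ofList_append, String.ofList_append, ← pv_zero, ← pv_one] at h2
      simpa [h] using h2
    · have h2 := ih (g ++ ['1']) (e ++ ['0'])
      rw [String.ofList_append, String.ofList_append, ← pv_zero, ← pv_one] at h2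
      simpa [h] using h2

-- the low-bit test used by the port, in testBit form
theorem pv_bitchar (x i : Nat) : ((x >>> i) &&& 1 == 1) = x.testBit i := by
  simp [Nat.testBit, Nat.and_one_is_mod, Nat.one_and_eq_mod_two]

-- rendering the bit accumulator from index n-1 down to 0 yields the per-element characters
theorem pv_render (c0 c1 : Char) : ∀ (occur : List (Int × Int)),
    (List.range occur.length).reverse.map
      (fun i => if (occur.foldl (fun (g : Nat) (o : Int × Int) => 2 * g + (if o.1 > o.2 then 0 else 1)) 0).testBit i then c1 else c0)
    = occur.map (fun o => if o.1 > o.2 then c0 else c1) := by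
  intro occur
  induction occur using List.reverseRecOn with
  | nil => simp
  | append_singleton rest o ih =>
    have hrange : (List.range (rest.length + 1)).reverse
        = ((List.range rest.length).reverse.map (· + 1)) ++ [0] := by
      rw [List.range_succ_eq_map]
      simp
    set g := rest.foldl (fun g o => 2 * g + (if o.1 > o.2 then 0 else 1)) 0 with hg
    set b : Nat := if o.1 > o.2 then 0 else 1 with hb
    have hfold : (rest ++ [o]).foldl (fun g o => 2 * g + (if o.1 > o.2 then 0 else 1)) 0
        = 2 * g + b := by simp [List.foldl_append, hg, hb]
    have hb2 : b ≤ 1 := by by_cases h : o.1 > o.2 <;> simp [hb, h]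
    have hdiv : (2 * g + b) / 2 = g := by omega
    have hshift : ∀ i : Nat, (2 * g + b).testBit (i + 1) = g.testBit i := by
      intro i
      rw [Nat.testBit_add_one, hdiv]
    have hbit0 : (2 * g + b).testBit 0 = (b == 1) := by
      rw [Nat.testBit_zero]
      rcases Nat.le_one_iff_eq_zero_or_eq_one.mp hb2 with h | h <;> simp [h]
    simp only [List.length_append, List.length_cons, List.length_nil, hfold, hrange,
      List.map_append, List.map_map, List.map_cons, List.map_nil]
    rw [ih.symm]
    congr 1
    · apply List.map_congr_left
      intro i _
      simp [Function.comp, hshift i]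
    · by_cases h : o.1 > o.2 <;> simp [hb, h]

-- inside the index range, epsilon's bits are the complement of gamma's
theorem pv_xor_bit (g n i : Nat) (hi : i < n) :
    (g ^^^ ((1 <<< n) - 1)).testBit i = !g.testBit i := by
  rw [Nat.one_shiftLeft, Nat.testBit_xor, Nat.testBit_two_pow_sub_one]
  simp [hi]

-- ===== VERDICT (by name: the statement is the Claim_ definition above) =====
theorem get_gamma_epsilon_spec : Claim_equal_get_gamma_epsilon := by
  intro occur _
  unfold Spec_get_gamma_epsilon get_gamma_epsilon get_gamma_epsilon_alt
  have hA := pv_fold_eq occur [] []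
  simp only [List.nil_append] at hA
  rw [show (("", "") : String × String) = (String.ofList [], String.ofList []) from rfl, hA]
  set g := occur.foldl (fun g o => 2 * g + (if o.1 > o.2 then 0 else 1)) 0 with hg
  have hgamma : (List.range occur.length).reverse.map
      (fun i => if (g >>> i) &&& 1 == 1 then '1' else '0')
      = occur.map (fun o => if o.1 > o.2 then '0' else '1') := by
    have := pv_render '0' '1' occur
    rw [← this]
    apply List.map_congr_left
    intro i _
    rw [pv_bitchar]
  have heps : (List.range occur.length).reverse.map
      (fun i => if ((g ^^^ ((1 <<< occur.length) - 1)) >>> i) &&& 1 == 1 then '1' else '0')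
      = occur.map (fun o => if o.1 > o.2 then '1' else '0') := by
    have h2 := pv_render '1' '0' occur
    rw [← hg] at h2
    rw [← h2]
    apply List.map_congr_left
    intro i hi
    have hin : i < occur.length := List.mem_range.mp (List.mem_reverse.mp hi)
    rw [pv_bitchar, pv_xor_bit g occur.length i hin]
    cases g.testBit i <;> simp
  simp only [hgamma, heps]
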